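-- pv_equiv track=rewrite | github.com/codersasank/problem-solving | geeks_for_geeks/police_and_thieves.py | catchThieves
-- ===== SOURCE A (Python) =====
-- from collections import deque
--
-- def catchThieves(arr, n, k):
--     if n==1:
--         return 0
--     q = deque()
--     i = 0
--     cnt = 0
--     while i<n:
--         if not q:
--             q.append(arr[i])
--             i += 1
--             continue
--         if q[0] is None:
--             q.popleft()
--         elif q[0]=='P':
--             if i<n and arr[i]!='T':
--                 q.append(arr[i])
--                 if len(q)>k:
--                     q.popleft()
--                     i += 1
--                     continue
--                 i += 1
--             elif i<n and arr[i]=='T':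
--                 q.append(None)
--                 q.popleft()
--                 cnt += 1
--                 i += 1
--             if i>=n:
--                 break
--         else:
--             if i<n and arr[i]!='P':
--                 q.append(arr[i])
--                 if len(q)>k:
--                     q.popleft()
--                     i += 1
--                     continue
--                 i += 1
--             elif i<n and arr[i]=='P':
--                 q.append(None)
--                 q.popleft()
--                 cnt += 1
--                 i += 1
--             if i>=n:
--                 break
--     return cnt
-- ===== SOURCE B (Python) =====
-- def catchThieves(arr, n, k):
--     pol = [i for i in range(n) if arr[i] == 'P']
--     thi = [i for i in range(n) if arr[i] == 'T']
--     cnt = 0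
--     p = 0
--     t = 0
--     while p < len(pol) and t < len(thi):
--         if abs(pol[p] - thi[t]) <= k:
--             cnt += 1
--             p += 1
--             t += 1
--         elif pol[p] < thi[t]:
--             p += 1
--         else:
--             t += 1
--     return cnt
-- ===== Notes on version B (the rewrite author's own statement) =====
-- stated objective: alternative
-- what changed: Replaces A's obfuscated deque sliding window (None placeholders, len(q)>k trimming) by building the index lists of 'P' and 'T' cells and counting matches with a standard two-pointer merge.
-- outside the precondition, e.g. on catchThieves(['T', 'P'], 2, 0): A returns 1, B returns 0; on catchThieves(['X', 'P'], 2, 1): A returns 1, B returns 0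
import Mathlib
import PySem

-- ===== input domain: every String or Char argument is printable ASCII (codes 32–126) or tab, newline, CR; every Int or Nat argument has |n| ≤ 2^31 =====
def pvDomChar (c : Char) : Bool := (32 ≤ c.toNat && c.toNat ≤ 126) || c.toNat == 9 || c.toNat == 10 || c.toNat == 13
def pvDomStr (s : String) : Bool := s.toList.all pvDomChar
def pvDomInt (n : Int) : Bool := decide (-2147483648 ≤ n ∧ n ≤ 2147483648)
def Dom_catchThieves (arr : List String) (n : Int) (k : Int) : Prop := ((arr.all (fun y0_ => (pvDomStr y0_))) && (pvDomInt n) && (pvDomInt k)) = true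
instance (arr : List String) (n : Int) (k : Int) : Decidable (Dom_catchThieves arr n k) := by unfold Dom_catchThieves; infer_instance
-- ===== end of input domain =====

-- B replaces A's obfuscated deque sliding window by index tables + a two-pointer merge (alternative algorithm, same cost).

-- ===== PORT A =====
-- the while loop of A: state (q, i, cnt); q holds arr-values, `none` is Python's None marker
def catchThievesLoop (arr : List String) (n : Int) (k : Int)
    (q : List (Option String)) (i : Int) (cnt : Int) : Int :=
  if _hlt : i < n then
    match q with
    | [] =>
      match PySem.List.pyGet? arr i with
      | none => cnt                                  -- Python raises IndexError here (outside Pre_)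
      | some s => catchThievesLoop arr n k [some s] (i + 1) cnt
    | none :: qt => catchThievesLoop arr n k qt i cnt
    | some h0 :: qt =>
      match PySem.List.pyGet? arr i with
      | none => cnt                                  -- Python raises IndexError here (outside Pre_)
      | some s =>
        if h0 = "P" then
          if s ≠ "T" then
            if ((some h0 :: qt ++ [some s]).length : Int) > k then
              catchThievesLoop arr n k (qt ++ [some s]) (i + 1) cnt
            else
              catchThievesLoop arr n k (some h0 :: qt ++ [some s]) (i + 1) cnt
          else
            catchThievesLoop arr n k (qt ++ [none]) (i + 1) (cnt + 1)
        else
          if s ≠ "P" then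
            if ((some h0 :: qt ++ [some s]).length : Int) > k then
              catchThievesLoop arr n k (qt ++ [some s]) (i + 1) cnt
            else
              catchThievesLoop arr n k (some h0 :: qt ++ [some s]) (i + 1) cnt
          else
            catchThievesLoop arr n k (qt ++ [none]) (i + 1) (cnt + 1)
  else cnt
termination_by ((n - i).toNat, q.length)
decreasing_by all_goals simp_wf <;> omega

def catchThieves (arr : List String) (n : Int) (k : Int) : Int :=
  if n = 1 then 0 else catchThievesLoop arr n k [] 0 0

-- ===== PORT B =====
-- [j for j in range(a, b) if arr[j] == c]
def pvIdxOf (arr : List String) (c : String) (a b : Int) : List Int :=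
  (PySem.List.pyRange a b 1).filter (fun j => PySem.List.pyGet? arr j == some c)

-- the two-pointer merge of Source B, consuming the two index lists from the front
def pvMerge (k : Int) : List Int → List Int → Int → Int
  | p :: ps, t :: ts, cnt =>
    if |p - t| ≤ k then pvMerge k ps ts (cnt + 1)
    else if p < t then pvMerge k ps (t :: ts) cnt
    else pvMerge k (p :: ps) ts cnt
  | _, _, cnt => cnt
termination_by ps ts _ => ps.length + ts.length

def catchThieves_alt (arr : List String) (n : Int) (k : Int) : Int :=
  pvMerge k (pvIdxOf arr "P" 0 n) (pvIdxOf arr "T" 0 n) 0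

-- ===== PRECONDITION & SPEC =====
-- Pre_ is the problem's natural domain plus the trivial sizes: n ≤ 0 or n = 1 (both programs return
-- 0 there whatever arr and k hold), or n ≤ len(arr) with the first n entries 'P'/'T' and k ≥ 1 as the
-- original problem guarantees.  For n ≥ 2, A's values on k ≤ 0 and on characters other than 'P'/'T'
-- are accidents of its deque encoding and are excluded (see claim cites); A raises IndexError for
-- 1 ≤ len(arr) < n.
def Pre_catchThieves (arr : List String) (n : Int) (k : Int) : Prop :=
  n ≤ 0 ∨ (n ≤ arr.length ∧ (n = 1 ∨ (1 ≤ k ∧ ∀ s ∈ arr.take n.toNat, s = "P" ∨ s = "T")))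
instance (arr : List String) (n : Int) (k : Int) : Decidable (Pre_catchThieves arr n k) := by
  unfold Pre_catchThieves; infer_instance

def pvWitness_catchThieves : List String × Int × Int := (["P", "T", "T", "P"], 4, 2)

def Spec_catchThieves (arr : List String) (n : Int) (k : Int) (out : Int) : Prop := out = catchThieves_alt arr n k
instance (arr : List String) (n : Int) (k : Int) (out : Int) : Decidable (Spec_catchThieves arr n k out) := by unfold Spec_catchThieves; infer_instance

-- ===== CLAIM (what is proved, stated in full; the proofs are below) =====
def Claim_equal_catchThieves : Prop := ∀ (arr : List String) (n : Int) (k : Int), Dom_catchThieves arr n k → Pre_catchThieves arr n k → Spec_catchThieves arr n k (catchThieves arr n k)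

-- ===== LEMMAS AND PROOFS =====
-- positions of the unmatched (non-None) slots of A's queue, if its first slot sits at position p
def pvUpos : List (Option String) → Int → List Int
  | [], _ => []
  | none :: t, p => pvUpos t (p + 1)
  | some _ :: t, p => p :: pvUpos t (p + 1)

theorem pvUpos_append_none (xs : List (Option String)) (p : Int) :
    pvUpos (xs ++ [none]) p = pvUpos xs p := by
  induction xs generalizing p with
  | nil => rfl
  | cons x xt ih => cases x <;> simp [pvUpos, ih]

theorem pvUpos_append_some (xs : List (Option String)) (s : String) (p : Int) :
    pvUpos (xs ++ [some s]) p = pvUpos xs p ++ [p + xs.length] := by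
  induction xs generalizing p with
  | nil => simp [pvUpos]
  | cons x xt ih =>
    cases x <;> simp [pvUpos, ih] <;> ring_nf

theorem pvIdxOf_nil (arr : List String) (c : String) (a b : Int) (h : b ≤ a) :
    pvIdxOf arr c a b = [] := by
  simp [pvIdxOf, PySem.List.pyRange_one_eq_nil h]

theorem pvIdxOf_cons (arr : List String) (c : String) (a b : Int) (h : a < b) :
    pvIdxOf arr c a b =
      if PySem.List.pyGet? arr a == some c then a :: pvIdxOf arr c (a + 1) b
      else pvIdxOf arr c (a + 1) b := by
  rw [pvIdxOf, PySem.List.pyRange_one_cons h, List.filter_cons]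
  split <;> rfl

theorem pvIdxOf_ge (arr : List String) (c : String) (a b : Int) (j : Int)
    (h : j ∈ pvIdxOf arr c a b) : a ≤ j := by
  have := List.mem_of_mem_filter h
  exact ((PySem.List.mem_pyRange_one).1 this).1

theorem pvMerge_nil_left (k : Int) (ts : List Int) (cnt : Int) :
    pvMerge k [] ts cnt = cnt := by
  cases ts <;> simp [pvMerge]

theorem pvMerge_nil_right (k : Int) (ps : List Int) (cnt : Int) :
    pvMerge k ps [] cnt = cnt := by
  cases ps <;> simp [pvMerge]

-- dropping a far-left police index does not change the merge when all thieves are beyond it by > k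
theorem pvMerge_drop_left (k : Int) (hk0 : 0 ≤ k) (p : Int) (ps ts : List Int) (cnt : Int)
    (h : ∀ t ∈ ts, p + k < t) : pvMerge k (p :: ps) ts cnt = pvMerge k ps ts cnt := by
  cases ts with
  | nil => simp [pvMerge_nil_right]
  | cons t tt =>
    have ht := h t (List.mem_cons_self ..)
    rw [pvMerge.eq_1,
        if_neg (by rw [abs_sub_comm, abs_of_pos (by omega)]; omega),
        if_pos (by omega)]

theorem pvMerge_drop_right (k : Int) (hk0 : 0 ≤ k) (t : Int) (ps ts : List Int) (cnt : Int)
    (h : ∀ p ∈ ps, t + k < p) : pvMerge k ps (t :: ts) cnt = pvMerge k ps ts cnt := by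
  cases ps with
  | nil => simp [pvMerge_nil_left]
  | cons p pt =>
    have hp := h p (List.mem_cons_self ..)
    rw [pvMerge.eq_1,
        if_neg (by rw [abs_of_pos (by omega)]; omega),
        if_neg (by omega)]

theorem pvIdx_step (arr : List String) (a b : Int) (c c' : String) (h : a < b)
    (hx : PySem.List.pyGet? arr a = some c') :
    pvIdxOf arr c a b =
      if c' = c then a :: pvIdxOf arr c (a + 1) b else pvIdxOf arr c (a + 1) b := by
  rw [pvIdxOf_cons _ _ _ _ h, hx]
  by_cases hcc : c' = c <;> simp [hcc]

theorem pvUpos_cons_some (s : String) (xs : List (Option String)) (p : Int) :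
    pvUpos (some s :: xs) p = p :: pvUpos xs (p + 1) := rfl

theorem pvUpos_congr (xs : List (Option String)) {p p' : Int} (h : p = p') :
    pvUpos xs p = pvUpos xs p' := by rw [h]

-- ===== the loop invariant =====
theorem pvInv (arr : List String) (n k : Int) (hk : 1 ≤ k) (hn : n ≤ arr.length)
    (hPT : ∀ j : Int, 0 ≤ j → j < n →
      PySem.List.pyGet? arr j = some "P" ∨ PySem.List.pyGet? arr j = some "T")
    (q : List (Option String)) (i cnt : Int) :
    ∀ c : String, 0 ≤ i → i ≤ n → (q.length : Int) ≤ k →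
    (c = "P" ∨ c = "T") →
    (∀ s : String, some s ∈ q → s = c) →
    catchThievesLoop arr n k q i cnt =
      pvMerge k
        (if c = "P" then pvUpos q (i - q.length) ++ pvIdxOf arr "P" i n else pvIdxOf arr "P" i n)
        (if c = "T" then pvUpos q (i - q.length) ++ pvIdxOf arr "T" i n else pvIdxOf arr "T" i n)
        cnt := by
  fun_induction catchThievesLoop arr n k q i cnt with
  | case1 i cnt h hnone =>
    intro c h0i _ _ _ _
    exfalso
    rcases hPT i h0i h with hh | hh <;> rw [hnone] at hh <;> simp at hh
  | case2 i cnt h s hx ih =>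
    intro c h0i hin hlen hc hu
    have hs : s = "P" ∨ s = "T" := by
      rcases hPT i h0i h with hh | hh <;> rw [hx] at hh <;> simp at hh
      · exact Or.inl hh
      · exact Or.inr hh
    rw [ih s (by omega) (by omega) (by simp; omega) hs (by simp)]
    rcases hs with rfl | rfl <;>
      rw [pvIdx_step arr i n "P" _ h hx, pvIdx_step arr i n "T" _ h hx] <;>
      simp [pvUpos]
  | case3 i cnt h qt ih =>
    intro c h0i hin hlen hc hu
    rw [ih c h0i hin (by simp at hlen ⊢; omega) hc
        (fun s hs => hu s (List.mem_cons_of_mem _ hs))]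
    have e : i - ((qt.length : Int) + 1) + 1 = i - qt.length := by ring
    simp [pvUpos, e]
  | case4 i cnt h h0 qt hnone =>
    intro c h0i _ _ _ _
    exfalso
    rcases hPT i h0i h with hh | hh <;> rw [hnone] at hh <;> simp at hh
  | case5 i cnt h qt s hx hsT hbig ih =>
    intro c h0i hin hlen hc hu
    obtain rfl : c = "P" := (hu "P" (by simp)).symm
    obtain rfl : s = "P" := by
      rcases hPT i h0i h with hh | hh <;> rw [hx] at hh <;> simp at hh
      · exact hh
      · exact absurd hh hsT
    have hlen' : (qt.length : Int) + 1 ≤ k := by simp at hlen; omega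
    have hkL : (qt.length : Int) + 1 = k := by simp at hbig; omega
    rw [ih "P" (by omega) (by omega) (by simp; omega) (Or.inl rfl)
        (by intro s' hs'
            rcases List.mem_append.1 hs' with h' | h'
            · exact hu s' (List.mem_cons_of_mem _ h')
            · simpa using h')]
    rw [pvIdx_step arr i n "P" _ h hx, pvIdx_step arr i n "T" _ h hx]
    simp only [String.reduceEq, reduceIte]
    have e1 : pvUpos (qt ++ [some "P"]) (i + 1 - ((qt ++ [some "P"]).length : Int))
        = pvUpos qt (i - (qt.length : Int)) ++ [i] := by
      rw [pvUpos_congr _ (show i + 1 - ((qt ++ [some "P"]).length : Int)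
            = i - (qt.length : Int) by push_cast [List.length_append, List.length_cons, List.length_nil]; ring), pvUpos_append_some]
      have e : i - (qt.length : Int) + qt.length = i := by ring
      rw [e]
    have e2 : pvUpos (some "P" :: qt) (i - ((some "P" :: qt).length : Int))
        = (i - ((qt.length : Int) + 1)) :: pvUpos qt (i - (qt.length : Int)) := by
      rw [pvUpos_cons_some,
          pvUpos_congr qt (show i - (((some "P" :: qt).length : Int)) + 1 = i - qt.length by
            push_cast [List.length_cons]; ring)]
      congr 1
    rw [e1, e2, List.cons_append,
        pvMerge_drop_left k (by omega) (i - ((qt.length : Int) + 1))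
          (pvUpos qt (i - (qt.length : Int)) ++ i :: pvIdxOf arr "P" (i + 1) n)
          (pvIdxOf arr "T" (i + 1) n) cnt
          (by intro t ht
              have := pvIdxOf_ge arr "T" (i + 1) n t ht
              omega)]
    simp [List.append_assoc]
  | case6 i cnt h qt s hx hsT hsmall ih =>
    intro c h0i hin hlen hc hu
    obtain rfl : c = "P" := (hu "P" (by simp)).symm
    obtain rfl : s = "P" := by
      rcases hPT i h0i h with hh | hh <;> rw [hx] at hh <;> simp at hh
      · exact hh
      · exact absurd hh hsT
    have hsmall' : (qt.length : Int) + 2 ≤ k := by simp at hsmall; omega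
    rw [ih "P" (by omega) (by omega) (by simp; omega) (Or.inl rfl)
        (by intro s' hs'
            rcases List.mem_cons.1 hs' with h' | h'
            · simpa using h'
            · rcases List.mem_append.1 h' with h'' | h''
              · exact hu s' (List.mem_cons_of_mem _ h'')
              · simpa using h'')]
    rw [pvIdx_step arr i n "P" _ h hx, pvIdx_step arr i n "T" _ h hx]
    simp only [String.reduceEq, reduceIte]
    have e1 : pvUpos (some "P" :: qt ++ [some "P"]) (i + 1 - ((some "P" :: qt ++ [some "P"]).length : Int))
        = (i - ((qt.length : Int) + 1)) :: (pvUpos qt (i - (qt.length : Int)) ++ [i]) := by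
      rw [show i + 1 - (((some "P" :: qt ++ [some "P"]).length : Int)) = i - ((qt.length : Int) + 1) by
            push_cast [List.length_cons, List.length_append, List.length_nil]; ring,
          pvUpos_append_some, pvUpos_cons_some, List.cons_append,
          pvUpos_congr qt (show i - ((qt.length : Int) + 1) + 1 = i - (qt.length : Int) by ring),
          show i - ((qt.length : Int) + 1) + (((some "P" :: qt).length : Int)) = i by
            push_cast [List.length_cons]; ring]
    have e2 : pvUpos (some "P" :: qt) (i - ((some "P" :: qt).length : Int))
        = (i - ((qt.length : Int) + 1)) :: pvUpos qt (i - (qt.length : Int)) := by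
      rw [pvUpos_cons_some,
          pvUpos_congr qt (show i - (((some "P" :: qt).length : Int)) + 1 = i - qt.length by
            push_cast [List.length_cons]; ring)]
      congr 1
    rw [e1, e2]
    simp [List.append_assoc]
  | case7 i cnt h qt s hx hTT ih =>
    intro c h0i hin hlen hc hu
    obtain rfl : c = "P" := (hu "P" (by simp)).symm
    obtain rfl : s = "T" := not_ne_iff.mp hTT
    have hlen' : (qt.length : Int) + 1 ≤ k := by simp at hlen; omega
    rw [ih "P" (by omega) (by omega) (by simp; omega) (Or.inl rfl)
        (by intro s' hs'
            rcases List.mem_append.1 hs' with h' | h'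
            · exact hu s' (List.mem_cons_of_mem _ h')
            · simp at h')]
    rw [pvIdx_step arr i n "P" _ h hx, pvIdx_step arr i n "T" _ h hx]
    simp only [String.reduceEq, reduceIte]
    have e1 : pvUpos (qt ++ [none]) (i + 1 - ((qt ++ [none]).length : Int))
        = pvUpos qt (i - (qt.length : Int)) := by
      rw [pvUpos_append_none]
      exact pvUpos_congr qt (by push_cast [List.length_append, List.length_cons, List.length_nil]; ring)
    have e2 : pvUpos (some "P" :: qt) (i - ((some "P" :: qt).length : Int))
        = (i - ((qt.length : Int) + 1)) :: pvUpos qt (i - (qt.length : Int)) := by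
      rw [pvUpos_cons_some,
          pvUpos_congr qt (show i - (((some "P" :: qt).length : Int)) + 1 = i - qt.length by
            push_cast [List.length_cons]; ring)]
      congr 1
    rw [e1, e2, List.cons_append, pvMerge.eq_1,
        if_pos (by rw [abs_le]; constructor <;> omega)]
  | case8 i cnt h h0 qt s hx hne hsP hbig ih =>
    intro c h0i hin hlen hc hu
    have hc0 : h0 = c := hu h0 (by simp)
    obtain rfl : c = "T" := by
      rcases hc with rfl | rfl
      · exact absurd hc0 hne
      · rfl
    subst hc0
    obtain rfl : s = "T" := by
      rcases hPT i h0i h with hh | hh <;> rw [hx] at hh <;> simp at hh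
      · exact absurd hh hsP
      · exact hh
    have hlen' : (qt.length : Int) + 1 ≤ k := by simp at hlen; omega
    have hkL : (qt.length : Int) + 1 = k := by simp at hbig; omega
    rw [ih "T" (by omega) (by omega) (by simp; omega) (Or.inr rfl)
        (by intro s' hs'
            rcases List.mem_append.1 hs' with h' | h'
            · exact hu s' (List.mem_cons_of_mem _ h')
            · simpa using h')]
    rw [pvIdx_step arr i n "P" _ h hx, pvIdx_step arr i n "T" _ h hx]
    simp only [String.reduceEq, reduceIte]
    have e1 : pvUpos (qt ++ [some "T"]) (i + 1 - ((qt ++ [some "T"]).length : Int))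
        = pvUpos qt (i - (qt.length : Int)) ++ [i] := by
      rw [pvUpos_congr _ (show i + 1 - ((qt ++ [some "T"]).length : Int)
            = i - (qt.length : Int) by push_cast [List.length_append, List.length_cons, List.length_nil]; ring), pvUpos_append_some]
      have e : i - (qt.length : Int) + qt.length = i := by ring
      rw [e]
    have e2 : pvUpos (some "T" :: qt) (i - ((some "T" :: qt).length : Int))
        = (i - ((qt.length : Int) + 1)) :: pvUpos qt (i - (qt.length : Int)) := by
      rw [pvUpos_cons_some,
          pvUpos_congr qt (show i - (((some "T" :: qt).length : Int)) + 1 = i - qt.length by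
            push_cast [List.length_cons]; ring)]
      congr 1
    rw [e1, e2, List.cons_append,
        pvMerge_drop_right k (by omega) (i - ((qt.length : Int) + 1))
          (pvIdxOf arr "P" (i + 1) n)
          (pvUpos qt (i - (qt.length : Int)) ++ i :: pvIdxOf arr "T" (i + 1) n) cnt
          (by intro p hp
              have := pvIdxOf_ge arr "P" (i + 1) n p hp
              omega)]
    simp [List.append_assoc]
  | case9 i cnt h h0 qt s hx hne hsP hsmall ih =>
    intro c h0i hin hlen hc hu
    have hc0 : h0 = c := hu h0 (by simp)
    obtain rfl : c = "T" := by
      rcases hc with rfl | rfl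
      · exact absurd hc0 hne
      · rfl
    subst hc0
    obtain rfl : s = "T" := by
      rcases hPT i h0i h with hh | hh <;> rw [hx] at hh <;> simp at hh
      · exact absurd hh hsP
      · exact hh
    have hsmall' : (qt.length : Int) + 2 ≤ k := by simp at hsmall; omega
    rw [ih "T" (by omega) (by omega) (by simp; omega) (Or.inr rfl)
        (by intro s' hs'
            rcases List.mem_cons.1 hs' with h' | h'
            · simpa using h'
            · rcases List.mem_append.1 h' with h'' | h''
              · exact hu s' (List.mem_cons_of_mem _ h'')
              · simpa using h'')]
    rw [pvIdx_step arr i n "P" _ h hx, pvIdx_step arr i n "T" _ h hx]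
    simp only [String.reduceEq, reduceIte]
    have e1 : pvUpos (some "T" :: qt ++ [some "T"]) (i + 1 - ((some "T" :: qt ++ [some "T"]).length : Int))
        = (i - ((qt.length : Int) + 1)) :: (pvUpos qt (i - (qt.length : Int)) ++ [i]) := by
      rw [show i + 1 - (((some "T" :: qt ++ [some "T"]).length : Int)) = i - ((qt.length : Int) + 1) by
            push_cast [List.length_cons, List.length_append, List.length_nil]; ring,
          pvUpos_append_some, pvUpos_cons_some, List.cons_append,
          pvUpos_congr qt (show i - ((qt.length : Int) + 1) + 1 = i - (qt.length : Int) by ring),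
          show i - ((qt.length : Int) + 1) + (((some "T" :: qt).length : Int)) = i by
            push_cast [List.length_cons]; ring]
    have e2 : pvUpos (some "T" :: qt) (i - ((some "T" :: qt).length : Int))
        = (i - ((qt.length : Int) + 1)) :: pvUpos qt (i - (qt.length : Int)) := by
      rw [pvUpos_cons_some,
          pvUpos_congr qt (show i - (((some "T" :: qt).length : Int)) + 1 = i - qt.length by
            push_cast [List.length_cons]; ring)]
      congr 1
    rw [e1, e2]
    simp [List.append_assoc]
  | case10 i cnt h h0 qt s hx hne hPP ih =>
    intro c h0i hin hlen hc hu
    have hc0 : h0 = c := hu h0 (by simp)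
    obtain rfl : c = "T" := by
      rcases hc with rfl | rfl
      · exact absurd hc0 hne
      · rfl
    subst hc0
    obtain rfl : s = "P" := not_ne_iff.mp hPP
    have hlen' : (qt.length : Int) + 1 ≤ k := by simp at hlen; omega
    rw [ih "T" (by omega) (by omega) (by simp; omega) (Or.inr rfl)
        (by intro s' hs'
            rcases List.mem_append.1 hs' with h' | h'
            · exact hu s' (List.mem_cons_of_mem _ h')
            · simp at h')]
    rw [pvIdx_step arr i n "P" _ h hx, pvIdx_step arr i n "T" _ h hx]
    simp only [String.reduceEq, reduceIte]
    have e1 : pvUpos (qt ++ [none]) (i + 1 - ((qt ++ [none]).length : Int))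
        = pvUpos qt (i - (qt.length : Int)) := by
      rw [pvUpos_append_none]
      exact pvUpos_congr qt (by push_cast [List.length_append, List.length_cons, List.length_nil]; ring)
    have e2 : pvUpos (some "T" :: qt) (i - ((some "T" :: qt).length : Int))
        = (i - ((qt.length : Int) + 1)) :: pvUpos qt (i - (qt.length : Int)) := by
      rw [pvUpos_cons_some,
          pvUpos_congr qt (show i - (((some "T" :: qt).length : Int)) + 1 = i - qt.length by
            push_cast [List.length_cons]; ring)]
      congr 1
    rw [e1, e2, List.cons_append, pvMerge.eq_1,
        if_pos (by rw [abs_le]; constructor <;> omega)]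
  | case11 q i cnt h =>
    intro c h0i hin hlen hc hu
    have hP : pvIdxOf arr "P" i n = [] := pvIdxOf_nil _ _ _ _ (by omega)
    have hT : pvIdxOf arr "T" i n = [] := pvIdxOf_nil _ _ _ _ (by omega)
    rcases hc with rfl | rfl <;> simp [hP, hT, pvMerge_nil_left, pvMerge_nil_right]

-- ===== VERDICT (by name: the statement is the Claim_ definition above) =====
theorem pvPre_elts (arr : List String) (n : Int) (hn : n ≤ arr.length)
    (hall : ∀ s ∈ arr.take n.toNat, s = "P" ∨ s = "T") :
    ∀ j : Int, 0 ≤ j → j < n →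
      PySem.List.pyGet? arr j = some "P" ∨ PySem.List.pyGet? arr j = some "T" := by
  intro j h0 hj
  have hjl : j.toNat < arr.length := by omega
  have hget : PySem.List.pyGet? arr j = some arr[j.toNat] :=
    PySem.List.pyGet?_eq_some_getElem (xs := arr) (i := j) h0 (by omega)
  have hmem : arr[j.toNat] ∈ arr.take n.toNat := by
    have hlt : j.toNat < (arr.take n.toNat).length := by
      rw [List.length_take]; omega
    have heq : (arr.take n.toNat)[j.toNat]'hlt = arr[j.toNat] := List.getElem_take
    exact heq ▸ List.getElem_mem hlt
  rcases hall _ hmem with hh | hh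
  · exact Or.inl (by rw [hget, hh])
  · exact Or.inr (by rw [hget, hh])

theorem catchThieves_spec : Claim_equal_catchThieves := by
  intro arr n k _ hpre
  unfold Spec_catchThieves catchThieves catchThieves_alt
  rcases hpre with hn0 | ⟨hn, hrest⟩
  · rw [if_neg (by omega), catchThievesLoop, dif_neg (by omega),
        pvIdxOf_nil arr "P" 0 n hn0, pvMerge_nil_left]
  rcases hrest with rfl | ⟨hk, hall⟩
  · rw [if_pos rfl]
    obtain ⟨s, hget⟩ : ∃ s, PySem.List.pyGet? arr 0 = some s :=
      ⟨_, PySem.List.pyGet?_eq_some_getElem (xs := arr) (i := 0) le_rfl (by omega)⟩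
    by_cases hs : s = "P"
    · rw [pvIdx_step arr 0 1 "T" _ one_pos hget, if_neg (by rw [hs]; decide),
          pvIdxOf_nil arr "T" (0 + 1) 1 (by norm_num), pvMerge_nil_right]
    · rw [pvIdx_step arr 0 1 "P" _ one_pos hget, if_neg hs,
          pvIdxOf_nil arr "P" (0 + 1) 1 (by norm_num), pvMerge_nil_left]
  · have hPT := pvPre_elts arr n hn hall
    by_cases h1 : n = 1
    · subst h1
      rw [if_pos rfl]
      rcases hPT 0 le_rfl one_pos with hh | hh
      · rw [pvIdx_step arr 0 1 "T" _ one_pos hh]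
        simp only [String.reduceEq, reduceIte]
        rw [pvIdxOf_nil arr "T" (0 + 1) 1 (by norm_num), pvMerge_nil_right]
      · rw [pvIdx_step arr 0 1 "P" _ one_pos hh]
        simp only [String.reduceEq, reduceIte]
        rw [pvIdxOf_nil arr "P" (0 + 1) 1 (by norm_num), pvMerge_nil_left]
    · rw [if_neg h1]
      by_cases h0 : 0 ≤ n
      · rw [pvInv arr n k hk hn hPT [] 0 0 "P" le_rfl h0 (by simp; omega) (Or.inl rfl) (by simp)]
        simp [pvUpos]
      · rw [catchThievesLoop, dif_neg (by omega)]
        rw [pvIdxOf_nil arr "P" 0 n (by omega), pvMerge_nil_left]
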